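-- pv_equiv track=rewrite | github.com/Xer0bit/f-youtubeMusic | utils/downloader_old.py | analyze_input_type
-- ===== SOURCE A (Python) =====
-- from typing import Optional, Tuple, List
--
-- def analyze_input_type(items: List[str]) -> str:
--     """Analyze the type of input items and return a descriptive string."""
--     if not items:
--         return "Empty input"
--
--     if len(items) == 1:
--         item = items[0]
--         if item.startswith(('http://', 'https://')):
--             # Check for playlist indicators
--             if any(playlist_indicator in item.lower() for playlist_indicator in [
--                 '&list=', 'playlist', '/playlist', 'list='
--             ]):
--                 return "Single playlist URL"
--             else:
--                 return "Single video/audio URL"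
--         else:
--             return "Single search query"
--     else:
--         # Multiple items - analyze composition
--         urls = [item for item in items if item.startswith(('http://', 'https://'))]
--         searches = [item for item in items if not item.startswith(('http://', 'https://'))]
--
--         parts = []
--         if urls:
--             # Check if any URLs are playlists
--             playlist_urls = [url for url in urls if any(
--                 playlist_indicator in url.lower() for playlist_indicator in [
--                     '&list=', 'playlist', '/playlist', 'list='
--                 ]
--             )]
--             if playlist_urls:
--                 parts.append(f"{len(playlist_urls)} playlist(s)")
--
--             regular_urls = len(urls) - len(playlist_urls)
--             if regular_urls > 0:
--                 parts.append(f"{regular_urls} URL(s)")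
--
--         if searches:
--             parts.append(f"{len(searches)} search query(ies)")
--
--         return f"Batch: {', '.join(parts)}"
-- ===== SOURCE B (Python) =====
-- from typing import List
--
-- def analyze_input_type(items: List[str]) -> str:
--     """Analyze the type of input items and return a descriptive string."""
--     pl = url = se = 0
--     for item in items:
--         if item.startswith(('http://', 'https://')):
--             low = item.lower()
--             if 'playlist' in low or 'list=' in low:
--                 pl += 1
--             else:
--                 url += 1
--         else:
--             se += 1
--     if not items:
--         return "Empty input"
--     if len(items) == 1:
--         if pl:
--             return "Single playlist URL"
--         if url:
--             return "Single video/audio URL"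
--         return "Single search query"
--     parts = []
--     if pl:
--         parts.append(f"{pl} playlist(s)")
--     if url:
--         parts.append(f"{url} URL(s)")
--     if se:
--         parts.append(f"{se} search query(ies)")
--     return "Batch: " + ", ".join(parts)
-- ===== Notes on version B (the rewrite author's own statement) =====
-- stated objective: simpler
-- what changed: Replaces A's three filter/comprehension passes and nested branch structure with one counting pass that classifies each item once into playlist/URL/search counters (dropping the two redundant playlist indicators subsumed by the others), then assembles the answer from the counters.
import Mathlib
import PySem

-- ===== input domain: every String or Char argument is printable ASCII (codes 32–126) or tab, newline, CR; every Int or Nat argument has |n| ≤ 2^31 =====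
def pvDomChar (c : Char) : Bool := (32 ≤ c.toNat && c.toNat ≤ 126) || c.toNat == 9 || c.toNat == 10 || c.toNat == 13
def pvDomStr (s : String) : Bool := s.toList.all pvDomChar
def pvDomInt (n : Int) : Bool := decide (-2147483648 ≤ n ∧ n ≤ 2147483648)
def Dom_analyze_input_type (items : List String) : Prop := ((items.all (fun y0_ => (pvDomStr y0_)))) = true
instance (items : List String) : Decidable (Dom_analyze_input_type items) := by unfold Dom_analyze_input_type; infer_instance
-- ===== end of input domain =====

-- B replaces A's three filter passes with a single counting pass (objective: simpler decomposition).

-- ===== PORT A =====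
-- item.startswith(('http://', 'https://'))
def aIsUrl (s : String) : Bool :=
  PySem.Str.startswith s "http://" || PySem.Str.startswith s "https://"

-- any(ind in item.lower() for ind in ['&list=', 'playlist', '/playlist', 'list='])
def aIsPlaylist (s : String) : Bool :=
  let low := PySem.Str.lower s
  PySem.Str.isIn "&list=" low || PySem.Str.isIn "playlist" low ||
    PySem.Str.isIn "/playlist" low || PySem.Str.isIn "list=" low

def analyze_input_type (items : List String) : String :=
  if items = [] then "Empty input"
  else if PySem.List.len items = 1 then
    let item := PySem.List.pyGetD items 0 ""
    if aIsUrl item then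
      if aIsPlaylist item then "Single playlist URL" else "Single video/audio URL"
    else "Single search query"
  else
    let urls := items.filter (fun i => aIsUrl i)
    let searches := items.filter (fun i => !aIsUrl i)
    let parts : List String :=
      (if urls ≠ [] then
        let playlist_urls := urls.filter (fun u => aIsPlaylist u)
        (if playlist_urls ≠ [] then
          [PySem.Int.toStr (playlist_urls.length : Int) ++ " playlist(s)"] else []) ++
        (if ((urls.length : Int) - (playlist_urls.length : Int)) > 0 then
          [PySem.Int.toStr ((urls.length : Int) - (playlist_urls.length : Int)) ++ " URL(s)"] else [])
      else []) ++
      (if searches ≠ [] then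
        [PySem.Int.toStr (searches.length : Int) ++ " search query(ies)"] else [])
    "Batch: " ++ PySem.Str.join ", " parts

-- ===== PORT B =====
-- item.startswith(('http://', 'https://'))
def bIsUrl (s : String) : Bool :=
  PySem.Str.startswith s "http://" || PySem.Str.startswith s "https://"

-- 'playlist' in low or 'list=' in low
def bIsPlaylist (s : String) : Bool :=
  let low := PySem.Str.lower s
  PySem.Str.isIn "playlist" low || PySem.Str.isIn "list=" low

def analyze_input_type_alt (items : List String) : String :=
  let c : Int × Int × Int := items.foldl
    (fun acc item =>
      if bIsUrl item then
        if bIsPlaylist item then (acc.1 + 1, acc.2.1, acc.2.2)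
        else (acc.1, acc.2.1 + 1, acc.2.2)
      else (acc.1, acc.2.1, acc.2.2 + 1)) (0, 0, 0)
  if items = [] then "Empty input"
  else if PySem.List.len items = 1 then
    if c.1 ≠ 0 then "Single playlist URL"
    else if c.2.1 ≠ 0 then "Single video/audio URL"
    else "Single search query"
  else
    let parts : List String :=
      (if c.1 ≠ 0 then [PySem.Int.toStr c.1 ++ " playlist(s)"] else []) ++
      (if c.2.1 ≠ 0 then [PySem.Int.toStr c.2.1 ++ " URL(s)"] else []) ++
      (if c.2.2 ≠ 0 then [PySem.Int.toStr c.2.2 ++ " search query(ies)"] else [])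
    "Batch: " ++ PySem.Str.join ", " parts

-- ===== PRECONDITION & SPEC =====
def Spec_analyze_input_type (items : List String) (out : String) : Prop := out = analyze_input_type_alt items
instance (items : List String) (out : String) : Decidable (Spec_analyze_input_type items out) := by unfold Spec_analyze_input_type; infer_instance

-- ===== CLAIM (what is proved, stated in full; the proofs are below) =====
def Claim_equal_analyze_input_type : Prop := ∀ (items : List String), Dom_analyze_input_type items → Spec_analyze_input_type items (analyze_input_type items)

-- ===== LEMMAS AND PROOFS =====

-- The two playlist tests agree: '&list=' is an infix of any string containing it iff 'list=' already is, likewise '/playlist' vs 'playlist'.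
theorem isPlaylist_eq (s : String) : aIsPlaylist s = bIsPlaylist s := by
  simp only [aIsPlaylist, bIsPlaylist]
  rw [Bool.eq_iff_iff]
  simp only [Bool.or_eq_true, PySem.Str.isIn_iff_infix]
  constructor
  · rintro (((h | h) | h) | h)
    · exact Or.inr (List.IsInfix.trans (by decide) h)
    · exact Or.inl h
    · exact Or.inl (List.IsInfix.trans (by decide) h)
    · exact Or.inr h
  · rintro (h | h)
    · exact Or.inl (Or.inl (Or.inr h))
    · exact Or.inr h

theorem isUrl_eq : bIsUrl = aIsUrl := rfl

theorem fold_counts (items : List String) (a b c : Int) :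
    items.foldl
      (fun (acc : Int × Int × Int) item =>
        if bIsUrl item then
          if bIsPlaylist item then (acc.1 + 1, acc.2.1, acc.2.2)
          else (acc.1, acc.2.1 + 1, acc.2.2)
        else (acc.1, acc.2.1, acc.2.2 + 1)) (a, b, c)
    = (a + (items.countP (fun i => aIsUrl i && aIsPlaylist i) : Int),
       b + (items.countP (fun i => aIsUrl i && !aIsPlaylist i) : Int),
       c + (items.countP (fun i => !aIsUrl i) : Int)) := by
  induction items generalizing a b c with
  | nil => simp
  | cons x xs ih =>
    simp only [List.foldl_cons, List.countP_cons]
    rw [isUrl_eq] at *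
    by_cases hu : aIsUrl x
    · by_cases hp : aIsPlaylist x
      · rw [if_pos hu, if_pos (by rw [isPlaylist_eq] at hp; exact hp), ih]
        simp [hu, hp]; omega
      · rw [if_pos hu, if_neg (by rw [isPlaylist_eq] at hp; exact hp), ih]
        simp [hu, hp]; omega
    · rw [if_neg hu, ih]
      simp [hu]; omega

theorem countP_and_split (items : List String) :
    items.countP (fun i => aIsUrl i)
      = items.countP (fun i => aIsUrl i && aIsPlaylist i)
        + items.countP (fun i => aIsUrl i && !aIsPlaylist i) := by
  induction items with
  | nil => rfl
  | cons x xs ih =>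
    simp only [List.countP_cons]
    by_cases hu : aIsUrl x <;> by_cases hp : aIsPlaylist x <;> simp [hu, hp] <;> omega

-- ===== VERDICT (by name: the statement is the Claim_ definition above) =====
theorem analyze_input_type_spec : Claim_equal_analyze_input_type := by
  intro items _
  unfold Spec_analyze_input_type analyze_input_type analyze_input_type_alt
  rw [fold_counts]
  match items with
  | [] => rfl
  | [x] =>
    simp only [PySem.List.len, List.length_cons, List.length_nil]
    norm_num
    by_cases hu : aIsUrl x
    · by_cases hp : aIsPlaylist x
      · simp [hu, hp]
      · simp [hu, hp]
    · simp [hu]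
  | x :: y :: rest =>
    have hne : (x :: y :: rest : List String) ≠ [] := by simp
    have hlen : PySem.List.len (x :: y :: rest) ≠ 1 := by
      simp [PySem.List.len_eq]; omega
    rw [if_neg hne, if_neg hne, if_neg hlen, if_neg hlen]
    set l : List String := x :: y :: rest with hl
    apply congrArg (fun parts => "Batch: " ++ PySem.Str.join ", " parts)
    have hfl : ∀ p : String → Bool, (l.filter p).length = l.countP p :=
      fun _ => List.countP_eq_length_filter.symm
    have hN : ∀ p : String → Bool, (l.filter p ≠ []) ↔ l.countP p ≠ 0 := by
      intro p; rw [← hfl p]; simp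
    have hplf : (l.filter (fun i => aIsUrl i)).filter (fun u => aIsPlaylist u)
        = l.filter (fun i => aIsUrl i && aIsPlaylist i) := by
      rw [List.filter_filter]; congr 1; funext a; exact Bool.and_comm _ _
    have hsplit := countP_and_split l
    set cP := l.countP (fun i => aIsUrl i && aIsPlaylist i) with hcP
    set cU := l.countP (fun i => aIsUrl i && !aIsPlaylist i) with hcU
    set cS := l.countP (fun i => !aIsUrl i) with hcS
    simp only [hplf, hfl, hN, hsplit, zero_add]
    rw [← hcS]
    have harg : ((cP + cU : Nat) : Int) - ((cP : Nat) : Int) = ((cU : Nat) : Int) := by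
      push_cast; ring
    rw [harg]
    have hpr : l.countP (fun a => decide ¬(aIsUrl a = true)) = l.countP (fun i => !aIsUrl i) :=
      List.countP_congr (fun a _ => by simp)
    have htot : (cP + cU) + cS = l.length := by
      rw [hcS, ← hsplit, ← hpr]
      exact (List.length_eq_countP_add_countP (fun i => aIsUrl i)).symm
    have hlen2 : 2 ≤ l.length := by simp [hl]
    clear hsplit hfl hN hplf hne hlen hl harg hpr
    clear_value cP cU cS l
    split_ifs <;> first | rfl | (exfalso; omega) | (rw [hcP])
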